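-- pv_equiv track=rewrite | github.com/pypi-data/pypi-mirror-360 | packages/persian-jalali-calendar/persian_jalali_calendar-1.0.1-py3-none-any.whl/jalali_calendar/converter.py | jalali_to_jdn
-- ===== SOURCE A (Python) =====
-- def is_jalali_leap(year: int) -> bool:
--     """
--     Checks if a given Jalali year is a leap year based on the 33-year cycle.
--     A Jalali year is a leap year if (year % 33) is in a specific set of numbers.
--     """
--     leap_remainders = {1, 5, 9, 13, 17, 22, 26, 30}
--     return (year % 33) in leap_remainders
--
-- JALALI_EPOCH_JDN = 1948320
--
-- def jalali_to_jdn(jy: int, jm: int, jd: int) -> int: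
--     """Converts a Jalali date to its Julian Day Number."""
--     days_in_year = (jy - 1) * 365
--
--     leap_years = 0
--     if jy > 1:
--
--         num_cycles = (jy - 1) // 33
--         leap_years = num_cycles * 8
--
--         remaining_years = (jy - 1) % 33
--         for i in range(1, remaining_years + 1):
--             if is_jalali_leap(i):
--                 leap_years += 1
--
--     days_in_month = 0
--
--     if 1 < jm <= 7:
--         days_in_month = (jm - 1) * 31
--
--     elif jm > 7:
--         days_in_month = 6 * 31 + (jm - 7) * 30
--
--     total_days = days_in_year + leap_years + days_in_month + jd - 1
--     return JALALI_EPOCH_JDN + total_days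
-- ===== SOURCE B (Python) =====
-- JALALI_EPOCH_JDN = 1948320
--
-- def jalali_to_jdn(jy: int, jm: int, jd: int) -> int:
--     """Converts a Jalali date to its Julian Day Number, fully closed-form.
--
--     Leap-year count over years 1..jy-1 of the 33-year cycle collapses to the
--     single floor division (8*(jy-1) + 29) // 33; the month offset collapses to
--     31*min(jm-1, 6) + 30*max(jm-7, 0). No loops, no leap table.
--     """
--     leap_years = (8 * (jy - 1) + 29) // 33 if jy > 1 else 0
--     days_in_month = 31 * min(jm - 1, 6) + 30 * max(jm - 7, 0) if jm > 1 else 0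
--     return JALALI_EPOCH_JDN + 365 * (jy - 1) + leap_years + days_in_month + jd - 1
-- ===== Notes on version B (the rewrite author's own statement) =====
-- stated objective: alternative
-- what changed: B is fully closed-form: the per-year leap scan (mod-33 set membership per year) collapses to the single floor division (8*(jy-1)+29)//33, and the month branch chain collapses to 31*min(jm-1,6)+30*max(jm-7,0); no loop and no leap-remainder table remain.
import Mathlib
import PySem

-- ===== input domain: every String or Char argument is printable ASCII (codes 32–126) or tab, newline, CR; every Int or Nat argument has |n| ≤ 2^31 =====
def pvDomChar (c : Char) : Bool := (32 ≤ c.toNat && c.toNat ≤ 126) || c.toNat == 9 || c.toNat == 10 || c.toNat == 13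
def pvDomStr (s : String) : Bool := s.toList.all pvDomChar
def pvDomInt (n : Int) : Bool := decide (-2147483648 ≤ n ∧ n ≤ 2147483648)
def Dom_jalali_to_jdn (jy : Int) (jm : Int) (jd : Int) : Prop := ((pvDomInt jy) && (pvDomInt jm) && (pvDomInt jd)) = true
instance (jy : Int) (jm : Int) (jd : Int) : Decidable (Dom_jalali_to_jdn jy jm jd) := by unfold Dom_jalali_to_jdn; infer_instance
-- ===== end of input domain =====

-- B replaces A's per-year leap scan and month branch chain with pure closed-form arithmetic
-- (a single floor division for the leap count, min/max for the month offset); same cost class.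
-- ===== PORT A =====
def is_jalali_leap (year : Int) : Bool :=
  [(1:Int),5,9,13,17,22,26,30].contains (PySem.Int.mod year 33)

-- Port of A: per-year loop over range(1, remaining_years+1) counting leap years.
def jalali_to_jdn (jy : Int) (jm : Int) (jd : Int) : Int :=
  let days_in_year := (jy - 1) * 365
  let leap_years : Int :=
    if jy > 1 then
      let num_cycles := PySem.Int.floordiv (jy - 1) 33
      let remaining_years := PySem.Int.mod (jy - 1) 33
      (PySem.List.pyRange 1 (remaining_years + 1) 1).foldl
        (fun acc i => if is_jalali_leap i then acc + 1 else acc) (num_cycles * 8)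
    else 0
  let days_in_month : Int :=
    if 1 < jm ∧ jm ≤ 7 then (jm - 1) * 31
    else if jm > 7 then 6 * 31 + (jm - 7) * 30
    else 0
  let total_days := days_in_year + leap_years + days_in_month + jd - 1
  1948320 + total_days

-- ===== PORT B =====
-- Port of B: closed-form leap count (8*(jy-1)+29)//33 and min/max month offset.
def jalali_to_jdn_alt (jy : Int) (jm : Int) (jd : Int) : Int :=
  let leap_years : Int :=
    if jy > 1 then PySem.Int.floordiv (8 * (jy - 1) + 29) 33 else 0
  let days_in_month : Int :=
    if jm > 1 then 31 * min (jm - 1) 6 + 30 * max (jm - 7) 0 else 0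
  1948320 + 365 * (jy - 1) + leap_years + days_in_month + jd - 1

-- ===== PRECONDITION & SPEC =====
def Spec_jalali_to_jdn (jy : Int) (jm : Int) (jd : Int) (out : Int) : Prop := out = jalali_to_jdn_alt jy jm jd
instance (jy : Int) (jm : Int) (jd : Int) (out : Int) : Decidable (Spec_jalali_to_jdn jy jm jd out) := by unfold Spec_jalali_to_jdn; infer_instance

-- ===== CLAIM (what is proved, stated in full; the proofs are below) =====
def Claim_equal_jalali_to_jdn : Prop := ∀ (jy : Int) (jm : Int) (jd : Int), Dom_jalali_to_jdn jy jm jd → Spec_jalali_to_jdn jy jm jd (jalali_to_jdn jy jm jd)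

-- ===== LEMMAS AND PROOFS =====

-- A's loop counter starts from the base; pulling the base out.
theorem foldl_count_base (l : List Int) (p : Int → Bool) (b : Int) :
    l.foldl (fun acc i => if p i then acc + 1 else acc) b
      = b + l.foldl (fun acc i => if p i then acc + 1 else acc) 0 := by
  induction l generalizing b with
  | nil => simp
  | cons x xs ih =>
    simp only [List.foldl_cons]
    rw [ih, ih (if p x then 0 + 1 else 0)]
    split <;> omega

-- For 0 ≤ r < 33 the per-year scan equals the closed-form floor division.
theorem scan_eq_closed (r : Int) (h0 : 0 ≤ r) (h1 : r < 33) :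
    (PySem.List.pyRange 1 (r + 1) 1).foldl
        (fun acc i => if is_jalali_leap i then acc + 1 else acc) (0:Int)
      = PySem.Int.floordiv (8 * r + 29) 33 := by
  interval_cases r <;> decide

-- floordiv splits off whole 33-multiples.
theorem floordiv_add_mul (a k : Int) :
    PySem.Int.floordiv (a + 33 * k) 33 = PySem.Int.floordiv a 33 + k := by
  rw [PySem.Int.floordiv_eq_ediv_of_pos (by norm_num),
      PySem.Int.floordiv_eq_ediv_of_pos (by norm_num)]
  omega

-- ===== VERDICT (by name: the statement is the Claim_ definition above) =====
theorem jalali_to_jdn_spec : Claim_equal_jalali_to_jdn := by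
  intro jy jm jd _
  unfold Spec_jalali_to_jdn jalali_to_jdn jalali_to_jdn_alt
  have hqr := PySem.Int.floordiv_mul_add_mod (jy - 1) 33
  have hleap :
      (if jy > 1 then
        (PySem.List.pyRange 1 (PySem.Int.mod (jy - 1) 33 + 1) 1).foldl
          (fun acc i => if is_jalali_leap i then acc + 1 else acc)
          (PySem.Int.floordiv (jy - 1) 33 * 8)
      else 0)
      = (if jy > 1 then PySem.Int.floordiv (8 * (jy - 1) + 29) 33 else 0) := by
    split
    · rw [foldl_count_base,
        scan_eq_closed _ (PySem.Int.mod_nonneg (jy - 1) (b := 33) (by norm_num))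
          (PySem.Int.mod_lt (jy - 1) (b := 33) (by norm_num))]
      have : (8 * (jy - 1) + 29)
          = (8 * PySem.Int.mod (jy - 1) 33 + 29) + 33 * (8 * PySem.Int.floordiv (jy - 1) 33) := by
        omega
      rw [this, floordiv_add_mul]
      ring
    · rfl
  simp only [hleap]
  simp only [min_def, max_def]
  split_ifs <;> omega
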